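-- pv_equiv track=rewrite | github.com/Xieyangxinyu/ClimRRGPT-beta | src/evaluation/utils.py | parse_current_entry
-- ===== SOURCE A (Python) =====
-- def parse_current_entry(entry, aspect):
--     return_list = []
--     if aspect == 'relevance':
--         for key in range(1, 7):
--             if f"relevance_feedback_q{key}" in entry.keys():
--                 return_list.append(entry[f"relevance_feedback_q{key}"])
--             else:
--                 return_list.append('Not Applicable')
--     elif aspect == 'accessibility':
--         for key in range(1, 4):
--             if f"accessibility_feedback_q{key}" in entry.keys():
--                 if key in [1, 3]:
--                     return_list.append('No' if entry[f"accessibility_feedback_q{key}"] == 'Yes' else 'Yes')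
--                 else:
--                     return_list.append(entry[f"accessibility_feedback_q{key}"])
--             else:
--                 return_list.append('Not Applicable')
--     elif aspect == 'entailment':
--         for key in range(1, 2):
--             if f"entailment_feedback_q{key}" in entry.keys():
--                 return_list.append(entry[f"entailment_feedback_q{key}"])
--             else:
--                 return_list.append('Not Applicable')
--
--     return return_list
-- ===== SOURCE B (Python) =====
-- def parse_current_entry(entry, aspect):
--     counts = {'relevance': 6, 'accessibility': 3, 'entailment': 1}
--     if aspect not in counts:
--         return []
--     n = counts[aspect]
--     # reverse index: feedback key -> question number
--     slots = {f"{aspect}_feedback_q{i}": i for i in range(1, n + 1)}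
--     result = ['Not Applicable'] * n
--     for key, value in entry.items():
--         i = slots.get(key)
--         if i is not None:
--             if aspect == 'accessibility' and i in (1, 3):
--                 value = 'No' if value == 'Yes' else 'Yes'
--             result[i - 1] = value
--     return result
-- ===== Notes on version B (the rewrite author's own statement) =====
-- stated objective: alternative
-- what changed: Instead of looping over question numbers and testing membership per question, B builds a reverse index (feedback key -> question number), preallocates the answer list with 'Not Applicable', and fills slots in a single pass over the entry's items.
import Mathlib
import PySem

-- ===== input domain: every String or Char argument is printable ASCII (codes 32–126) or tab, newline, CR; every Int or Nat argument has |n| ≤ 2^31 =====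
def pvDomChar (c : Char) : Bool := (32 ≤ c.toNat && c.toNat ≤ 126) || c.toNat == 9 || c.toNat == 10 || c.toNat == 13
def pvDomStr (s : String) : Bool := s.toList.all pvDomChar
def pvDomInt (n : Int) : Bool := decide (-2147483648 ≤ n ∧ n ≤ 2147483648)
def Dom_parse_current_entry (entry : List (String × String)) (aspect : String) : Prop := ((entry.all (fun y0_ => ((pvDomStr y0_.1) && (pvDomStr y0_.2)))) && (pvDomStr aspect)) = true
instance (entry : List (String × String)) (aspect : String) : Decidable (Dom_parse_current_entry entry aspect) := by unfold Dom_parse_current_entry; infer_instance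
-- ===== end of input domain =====

-- B inverts A's traversal: a reverse index (feedback key -> question slot) plus a preallocated
-- 'Not Applicable' list filled in one pass over the entry's items, instead of A's per-question
-- membership tests; equivalence of the return values is proved below (objective: alternative).

-- ===== PORT A =====
-- literal transliteration of A: dict built from the pairs, three aspect branches, each a foldl
-- appending either the looked-up value (flipped for accessibility q1/q3) or 'Not Applicable'.
def parse_current_entry (entry : List (String × String)) (aspect : String) : List String :=
  let d := PySem.Dict.ofList entry
  let return_list : List String := []
  if aspect == "relevance" then
    (PySem.List.pyRange 1 7 1).foldl (fun acc key =>
      match d.get? ("relevance_feedback_q" ++ PySem.Int.toStr key) with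
      | some v => acc ++ [v]
      | none => acc ++ ["Not Applicable"]) return_list
  else if aspect == "accessibility" then
    (PySem.List.pyRange 1 4 1).foldl (fun acc key =>
      match d.get? ("accessibility_feedback_q" ++ PySem.Int.toStr key) with
      | some v =>
          if key ∈ ([1, 3] : List Int) then
            acc ++ [if v == "Yes" then "No" else "Yes"]
          else
            acc ++ [v]
      | none => acc ++ ["Not Applicable"]) return_list
  else if aspect == "entailment" then
    (PySem.List.pyRange 1 2 1).foldl (fun acc key =>
      match d.get? ("entailment_feedback_q" ++ PySem.Int.toStr key) with
      | some v => acc ++ [v]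
      | none => acc ++ ["Not Applicable"]) return_list
  else return_list

-- ===== PORT B =====
-- Source B: counts table, reverse index 'slots' (key -> question number), preallocated result list,
-- one pass over entry's items setting result[i-1].
def parse_current_entry_alt (entry : List (String × String)) (aspect : String) : List String :=
  let counts := PySem.Dict.ofList
    [("relevance", (6 : Int)), ("accessibility", (3 : Int)), ("entailment", (1 : Int))]
  match counts.get? aspect with
  | none => []
  | some n =>
    let slots := PySem.Dict.ofList ((PySem.List.pyRange 1 (n + 1) 1).map
        (fun i => (aspect ++ "_feedback_q" ++ PySem.Int.toStr i, i)))
    entry.foldl (fun result kv =>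
      match slots.get? kv.1 with
      | none => result
      | some i =>
          let v := if aspect == "accessibility" && (i == 1 || i == 3)
                   then (if kv.2 == "Yes" then "No" else "Yes") else kv.2
          -- result[i - 1] = v : the index is always in range (1 ≤ i ≤ n = result length), so
          -- List.set is exact here
          result.set (i - 1).toNat v)
      (List.replicate n.toNat "Not Applicable")

-- ===== PRECONDITION & SPEC =====
def Spec_parse_current_entry (entry : List (String × String)) (aspect : String) (out : List String) : Prop := out = parse_current_entry_alt entry aspect
instance (entry : List (String × String)) (aspect : String) (out : List String) : Decidable (Spec_parse_current_entry entry aspect out) := by unfold Spec_parse_current_entry; infer_instance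

-- ===== CLAIM (what is proved, stated in full; the proofs are below) =====
def Claim_equal_parse_current_entry : Prop := ∀ (entry : List (String × String)) (aspect : String), Dom_parse_current_entry entry aspect → Spec_parse_current_entry entry aspect (parse_current_entry entry aspect)

-- ===== LEMMAS AND PROOFS =====

-- helper cells: lookup with 'Not Applicable' default, plain and Yes/No-flipped
def pvGetNA (d : PySem.Dict String String) (key : String) : String :=
  match d.get? key with | none => "Not Applicable" | some v => v
def pvGetFlip (d : PySem.Dict String String) (key : String) : String :=
  match d.get? key with | none => "Not Applicable" | some v => if v == "Yes" then "No" else "Yes"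

-- the value both programs compute for each aspect, as a function of the entry dict
def pvResR (d : PySem.Dict String String) : List String :=
  [pvGetNA d "relevance_feedback_q1", pvGetNA d "relevance_feedback_q2", pvGetNA d "relevance_feedback_q3",
   pvGetNA d "relevance_feedback_q4", pvGetNA d "relevance_feedback_q5", pvGetNA d "relevance_feedback_q6"]
def pvResA (d : PySem.Dict String String) : List String :=
  [pvGetFlip d "accessibility_feedback_q1", pvGetNA d "accessibility_feedback_q2",
   pvGetFlip d "accessibility_feedback_q3"]
def pvResE (d : PySem.Dict String String) : List String :=
  [pvGetNA d "entailment_feedback_q1"]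

-- B's reverse-index dicts and fold steps, one per aspect (aspect and n substituted)
def slotsR : PySem.Dict String Int :=
  PySem.Dict.ofList ((PySem.List.pyRange 1 ((6:Int) + 1) 1).map
    (fun i => ("relevance" ++ "_feedback_q" ++ PySem.Int.toStr i, i)))
def slotsA : PySem.Dict String Int :=
  PySem.Dict.ofList ((PySem.List.pyRange 1 ((3:Int) + 1) 1).map
    (fun i => ("accessibility" ++ "_feedback_q" ++ PySem.Int.toStr i, i)))
def slotsE : PySem.Dict String Int :=
  PySem.Dict.ofList ((PySem.List.pyRange 1 ((1:Int) + 1) 1).map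
    (fun i => ("entailment" ++ "_feedback_q" ++ PySem.Int.toStr i, i)))

def stepR : List String → (String × String) → List String := fun result kv =>
  match slotsR.get? kv.1 with
  | none => result
  | some i =>
      let v := if ("relevance" == "accessibility" : Bool) && (i == 1 || i == 3)
               then (if kv.2 == "Yes" then "No" else "Yes") else kv.2
      result.set (i - 1).toNat v
def stepA : List String → (String × String) → List String := fun result kv =>
  match slotsA.get? kv.1 with
  | none => result
  | some i =>
      let v := if ("accessibility" == "accessibility" : Bool) && (i == 1 || i == 3)
               then (if kv.2 == "Yes" then "No" else "Yes") else kv.2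
      result.set (i - 1).toNat v
def stepE : List String → (String × String) → List String := fun result kv =>
  match slotsE.get? kv.1 with
  | none => result
  | some i =>
      let v := if ("entailment" == "accessibility" : Bool) && (i == 1 || i == 3)
               then (if kv.2 == "Yes" then "No" else "Yes") else kv.2
      result.set (i - 1).toNat v

-- A's per-aspect loop computes pvRes* of the entry dict
theorem pvA_rel (d : PySem.Dict String String) :
    (PySem.List.pyRange 1 7 1).foldl (fun acc key =>
      match d.get? ("relevance_feedback_q" ++ PySem.Int.toStr key) with
      | some v => acc ++ [v]
      | none => acc ++ ["Not Applicable"]) [] = pvResR d := by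
  simp only [show PySem.List.pyRange 1 7 1 = [1,2,3,4,5,6] from by decide,
    List.foldl_cons, List.foldl_nil,
    show ("relevance_feedback_q" ++ PySem.Int.toStr 1 : String) = "relevance_feedback_q1" from by decide,
    show ("relevance_feedback_q" ++ PySem.Int.toStr 2 : String) = "relevance_feedback_q2" from by decide,
    show ("relevance_feedback_q" ++ PySem.Int.toStr 3 : String) = "relevance_feedback_q3" from by decide,
    show ("relevance_feedback_q" ++ PySem.Int.toStr 4 : String) = "relevance_feedback_q4" from by decide,
    show ("relevance_feedback_q" ++ PySem.Int.toStr 5 : String) = "relevance_feedback_q5" from by decide,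
    show ("relevance_feedback_q" ++ PySem.Int.toStr 6 : String) = "relevance_feedback_q6" from by decide]
  simp [pvResR, pvGetNA]
  cases d.get? "relevance_feedback_q1" <;> cases d.get? "relevance_feedback_q2" <;>
    cases d.get? "relevance_feedback_q3" <;> cases d.get? "relevance_feedback_q4" <;>
    cases d.get? "relevance_feedback_q5" <;> cases d.get? "relevance_feedback_q6" <;> simp

theorem pvA_acc (d : PySem.Dict String String) :
    (PySem.List.pyRange 1 4 1).foldl (fun acc key =>
      match d.get? ("accessibility_feedback_q" ++ PySem.Int.toStr key) with
      | some v =>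
          if key ∈ ([1, 3] : List Int) then
            acc ++ [if v == "Yes" then "No" else "Yes"]
          else
            acc ++ [v]
      | none => acc ++ ["Not Applicable"]) [] = pvResA d := by
  simp only [show PySem.List.pyRange 1 4 1 = [1,2,3] from by decide,
    List.foldl_cons, List.foldl_nil,
    show ("accessibility_feedback_q" ++ PySem.Int.toStr 1 : String) = "accessibility_feedback_q1" from by decide,
    show ("accessibility_feedback_q" ++ PySem.Int.toStr 2 : String) = "accessibility_feedback_q2" from by decide,
    show ("accessibility_feedback_q" ++ PySem.Int.toStr 3 : String) = "accessibility_feedback_q3" from by decide]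
  simp [pvResA, pvGetNA, pvGetFlip]
  cases d.get? "accessibility_feedback_q1" <;> cases d.get? "accessibility_feedback_q2" <;>
    cases d.get? "accessibility_feedback_q3" <;> simp

theorem pvA_ent (d : PySem.Dict String String) :
    (PySem.List.pyRange 1 2 1).foldl (fun acc key =>
      match d.get? ("entailment_feedback_q" ++ PySem.Int.toStr key) with
      | some v => acc ++ [v]
      | none => acc ++ ["Not Applicable"]) [] = pvResE d := by
  simp only [show PySem.List.pyRange 1 2 1 = [1] from by decide,
    List.foldl_cons, List.foldl_nil,
    show ("entailment_feedback_q" ++ PySem.Int.toStr 1 : String) = "entailment_feedback_q1" from by decide]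
  simp [pvResE, pvGetNA]
  cases d.get? "entailment_feedback_q1" <;> simp

-- B's fold step turns pvRes* of d into pvRes* of d.insert k v
theorem pvStep_rel (d : PySem.Dict String String) (k v : String) :
    stepR (pvResR d) (k, v) = pvResR (d.insert k v) := by
  by_cases h1 : k = "relevance_feedback_q1"
  · subst h1
    simp [stepR, show slotsR.get? "relevance_feedback_q1" = some 1 from by decide,
      pvResR, pvGetNA, PySem.Dict.get?_insert]
  by_cases h2 : k = "relevance_feedback_q2"
  · subst h2
    simp [stepR, show slotsR.get? "relevance_feedback_q2" = some 2 from by decide,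
      pvResR, pvGetNA, PySem.Dict.get?_insert]
  by_cases h3 : k = "relevance_feedback_q3"
  · subst h3
    simp [stepR, show slotsR.get? "relevance_feedback_q3" = some 3 from by decide,
      pvResR, pvGetNA, PySem.Dict.get?_insert]
  by_cases h4 : k = "relevance_feedback_q4"
  · subst h4
    simp [stepR, show slotsR.get? "relevance_feedback_q4" = some 4 from by decide,
      pvResR, pvGetNA, PySem.Dict.get?_insert]
  by_cases h5 : k = "relevance_feedback_q5"
  · subst h5
    simp [stepR, show slotsR.get? "relevance_feedback_q5" = some 5 from by decide,
      pvResR, pvGetNA, PySem.Dict.get?_insert]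
  by_cases h6 : k = "relevance_feedback_q6"
  · subst h6
    simp [stepR, show slotsR.get? "relevance_feedback_q6" = some 6 from by decide,
      pvResR, pvGetNA, PySem.Dict.get?_insert]
  · have hs : slotsR.get? k = none := by
      rw [show slotsR = PySem.Dict.mk
        [("relevance_feedback_q1",(1:Int)), ("relevance_feedback_q2",2), ("relevance_feedback_q3",3),
         ("relevance_feedback_q4",4), ("relevance_feedback_q5",5), ("relevance_feedback_q6",6)] from by decide]
      simp [beq_iff_eq, Ne.symm h1, Ne.symm h2, Ne.symm h3,
        Ne.symm h4, Ne.symm h5, Ne.symm h6, PySem.Dict.get?]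
    simp [stepR, hs, pvResR, pvGetNA, PySem.Dict.get?_insert,
      Ne.symm h1, Ne.symm h2, Ne.symm h3, Ne.symm h4, Ne.symm h5, Ne.symm h6]

theorem pvStep_acc (d : PySem.Dict String String) (k v : String) :
    stepA (pvResA d) (k, v) = pvResA (d.insert k v) := by
  by_cases h1 : k = "accessibility_feedback_q1"
  · subst h1
    simp [stepA, show slotsA.get? "accessibility_feedback_q1" = some 1 from by decide,
      pvResA, pvGetNA, pvGetFlip, PySem.Dict.get?_insert]
  by_cases h2 : k = "accessibility_feedback_q2"
  · subst h2
    simp [stepA, show slotsA.get? "accessibility_feedback_q2" = some 2 from by decide,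
      pvResA, pvGetNA, pvGetFlip, PySem.Dict.get?_insert]
  by_cases h3 : k = "accessibility_feedback_q3"
  · subst h3
    simp [stepA, show slotsA.get? "accessibility_feedback_q3" = some 3 from by decide,
      pvResA, pvGetNA, pvGetFlip, PySem.Dict.get?_insert]
  · have hs : slotsA.get? k = none := by
      rw [show slotsA = PySem.Dict.mk
        [("accessibility_feedback_q1",(1:Int)), ("accessibility_feedback_q2",2),
         ("accessibility_feedback_q3",3)] from by decide]
      simp [beq_iff_eq, Ne.symm h1, Ne.symm h2, Ne.symm h3, PySem.Dict.get?]
    simp [stepA, hs, pvResA, pvGetNA, pvGetFlip, PySem.Dict.get?_insert,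
      Ne.symm h1, Ne.symm h2, Ne.symm h3]

theorem pvStep_ent (d : PySem.Dict String String) (k v : String) :
    stepE (pvResE d) (k, v) = pvResE (d.insert k v) := by
  by_cases h1 : k = "entailment_feedback_q1"
  · subst h1
    simp [stepE, show slotsE.get? "entailment_feedback_q1" = some 1 from by decide,
      pvResE, pvGetNA]
  · have hs : slotsE.get? k = none := by
      rw [show slotsE = PySem.Dict.mk [("entailment_feedback_q1",(1:Int))] from by decide]
      simp [beq_iff_eq, Ne.symm h1, PySem.Dict.get?]
    simp [stepE, hs, pvResE, pvGetNA, PySem.Dict.get?_insert, Ne.symm h1]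

-- B's whole fold maintains pvRes* as the entry pairs are inserted
theorem pvFill_rel (l : List (String × String)) (d : PySem.Dict String String) :
    l.foldl stepR (pvResR d) = pvResR (l.foldl (fun d p => d.insert p.1 p.2) d) := by
  induction l generalizing d with
  | nil => rfl
  | cons p t ih => simpa [List.foldl_cons, pvStep_rel d p.1 p.2] using ih (d.insert p.1 p.2)

theorem pvFill_acc (l : List (String × String)) (d : PySem.Dict String String) :
    l.foldl stepA (pvResA d) = pvResA (l.foldl (fun d p => d.insert p.1 p.2) d) := by
  induction l generalizing d with
  | nil => rfl
  | cons p t ih => simpa [List.foldl_cons, pvStep_acc d p.1 p.2] using ih (d.insert p.1 p.2)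

theorem pvFill_ent (l : List (String × String)) (d : PySem.Dict String String) :
    l.foldl stepE (pvResE d) = pvResE (l.foldl (fun d p => d.insert p.1 p.2) d) := by
  induction l generalizing d with
  | nil => rfl
  | cons p t ih => simpa [List.foldl_cons, pvStep_ent d p.1 p.2] using ih (d.insert p.1 p.2)

-- B on each known aspect
theorem pvB_rel (entry : List (String × String)) :
    parse_current_entry_alt entry "relevance" = pvResR (PySem.Dict.ofList entry) := by
  show entry.foldl stepR (List.replicate ((6:Int)).toNat "Not Applicable") = _
  rw [show List.replicate ((6:Int)).toNat "Not Applicable" = pvResR PySem.Dict.empty from by decide]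
  rw [pvFill_rel]
  rfl

theorem pvB_acc (entry : List (String × String)) :
    parse_current_entry_alt entry "accessibility" = pvResA (PySem.Dict.ofList entry) := by
  show entry.foldl stepA (List.replicate ((3:Int)).toNat "Not Applicable") = _
  rw [show List.replicate ((3:Int)).toNat "Not Applicable" = pvResA PySem.Dict.empty from by decide]
  rw [pvFill_acc]
  rfl

theorem pvB_ent (entry : List (String × String)) :
    parse_current_entry_alt entry "entailment" = pvResE (PySem.Dict.ofList entry) := by
  show entry.foldl stepE (List.replicate ((1:Int)).toNat "Not Applicable") = _
  rw [show List.replicate ((1:Int)).toNat "Not Applicable" = pvResE PySem.Dict.empty from by decide]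
  rw [pvFill_ent]
  rfl

-- ===== VERDICT (by name: the statement is the Claim_ definition above) =====
theorem parse_current_entry_spec : Claim_equal_parse_current_entry := by
  intro entry aspect _
  unfold Spec_parse_current_entry
  by_cases h1 : aspect = "relevance"
  · subst h1
    rw [pvB_rel]
    exact pvA_rel (PySem.Dict.ofList entry)
  by_cases h2 : aspect = "accessibility"
  · subst h2
    rw [pvB_acc]
    exact pvA_acc (PySem.Dict.ofList entry)
  by_cases h3 : aspect = "entailment"
  · subst h3
    rw [pvB_ent]
    exact pvA_ent (PySem.Dict.ofList entry)
  · have hc : (PySem.Dict.ofList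
        [("relevance", (6 : Int)), ("accessibility", (3 : Int)), ("entailment", (1 : Int))]).get? aspect
        = none := by
      rw [show PySem.Dict.ofList
          [("relevance", (6 : Int)), ("accessibility", (3 : Int)), ("entailment", (1 : Int))]
          = PySem.Dict.mk [("relevance", (6 : Int)), ("accessibility", 3), ("entailment", 1)] from by decide]
      simp [beq_iff_eq, Ne.symm h1, Ne.symm h2, Ne.symm h3, PySem.Dict.get?]
    simp [parse_current_entry, parse_current_entry_alt, h1, h2, h3, hc]
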